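-- pv_equiv track=rewrite | github.com/Reynouts/AoC19 | AoC19/day17.py | stringtogrid
-- ===== SOURCE A (Python) =====
-- def stringtogrid(s):
--     grid = [[]]
--     for i in s:
--         if chr(i) == "\n":
--             grid.append([])
--         else:
--             grid[-1].append(i)
--     return grid
-- ===== SOURCE B (Python) =====
-- def stringtogrid(s):
--     # find the newline positions once, then slice the codes between consecutive breaks
--     positions = [j for j, i in enumerate(s) if chr(i) == "\n"]
--     breaks = [-1] + positions + [len(s)]
--     return [s[b + 1:e] for b, e in zip(breaks, breaks[1:])]
-- ===== Notes on version B (the rewrite author's own statement) =====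
-- stated objective: alternative
-- what changed: B computes the list of newline positions once, brackets it with -1/len sentinels, and slices the input between consecutive breaks, instead of iterating while appending each code to the last row of a growing grid.
import Mathlib
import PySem

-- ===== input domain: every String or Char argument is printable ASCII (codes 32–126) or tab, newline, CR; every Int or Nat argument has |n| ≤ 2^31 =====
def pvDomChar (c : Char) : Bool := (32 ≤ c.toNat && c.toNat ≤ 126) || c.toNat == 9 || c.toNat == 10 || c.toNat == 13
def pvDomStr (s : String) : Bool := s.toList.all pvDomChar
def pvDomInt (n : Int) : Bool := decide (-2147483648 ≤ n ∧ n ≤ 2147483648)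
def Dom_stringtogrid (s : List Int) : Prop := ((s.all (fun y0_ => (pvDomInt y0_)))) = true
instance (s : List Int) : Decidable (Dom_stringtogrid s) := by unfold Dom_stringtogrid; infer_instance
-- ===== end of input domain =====

-- B slices the input between precomputed newline positions instead of appending to the last row; alternative decomposition, same cost. Both versions raise on codes outside chr's range (excluded by Pre_).

-- ===== PORT A =====
-- grid[-1].append(i): append i to the last row of the grid (grid is always nonempty)
def appendLastA : List (List Int) → Int → List (List Int)
  | [], _ => []
  | [r], i => [r ++ [i]]
  | r :: rs, i => r :: appendLastA rs i

-- on Pre_ (valid code points) chr(i) == "\n" holds exactly when i = 10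
def stringtogrid (s : List Int) : List (List Int) :=
  s.foldl (fun grid i => if i == 10 then grid ++ [[]] else appendLastA grid i) [[]]

-- ===== PORT B =====
-- [j for j, i in enumerate(s) if chr(i) == "\n"]  (chr(i) == "\n" ↔ i = 10 on Pre_)
def positionsB (s : List Int) : List Int :=
  ((PySem.List.enumerate s).filter (fun p => p.2 == 10)).map (fun p => p.1)

def stringtogrid_alt (s : List Int) : List (List Int) :=
  let breaks : List Int := [-1] ++ positionsB s ++ [(s.length : Int)]
  -- zip(breaks, breaks[1:]) and the slice s[b+1:e]
  (breaks.zip breaks.tail).map (fun p => PySem.List.slice s (some (p.1 + 1)) (some p.2))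

-- ===== PRECONDITION & SPEC =====
-- Pre_ excludes exactly the inputs on which Python A raises ValueError: chr(i) needs 0 ≤ i < 0x110000.
def Pre_stringtogrid (s : List Int) : Prop := ∀ i ∈ s, 0 ≤ i ∧ i < 1114112
instance (s : List Int) : Decidable (Pre_stringtogrid s) := by unfold Pre_stringtogrid; infer_instance

def pvWitness_stringtogrid : List Int := [72, 105, 10, 33]

def Spec_stringtogrid (s : List Int) (out : List (List Int)) : Prop := out = stringtogrid_alt s
instance (s : List Int) (out : List (List Int)) : Decidable (Spec_stringtogrid s out) := by unfold Spec_stringtogrid; infer_instance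

-- ===== CLAIM (what is proved, stated in full; the proofs are below) =====
def Claim_equal_stringtogrid : Prop := ∀ (s : List Int), Dom_stringtogrid s → Pre_stringtogrid s → Spec_stringtogrid s (stringtogrid s)

-- ===== LEMMAS AND PROOFS =====

-- common specification: head-recursive newline splitter
def splitSpec : List Int → List (List Int)
  | [] => [[]]
  | a :: t => if a = 10 then [] :: splitSpec t else (a :: (splitSpec t).headI) :: (splitSpec t).tail

theorem splitSpec_ne_nil (s : List Int) : splitSpec s ≠ [] := by
  cases s with
  | nil => simp [splitSpec]
  | cons a t => by_cases h : a = 10 <;> simp [splitSpec, h]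

theorem headI_cons_tail {α : Type} [Inhabited α] (l : List α) (h : l ≠ []) : l.headI :: l.tail = l := by
  cases l with
  | nil => exact absurd rfl h
  | cons a t => rfl

-- ---- A side ----

theorem appendLastA_append (acc : List (List Int)) (cur : List Int) (i : Int) :
    appendLastA (acc ++ [cur]) i = acc ++ [cur ++ [i]] := by
  induction acc with
  | nil => rfl
  | cons r rs ih =>
      cases rs with
      | nil => rfl
      | cons r' rs' =>
          simp only [List.cons_append, appendLastA] at ih ⊢
          rw [ih]

theorem foldlA_eq (s : List Int) :
    ∀ (acc : List (List Int)) (cur : List Int),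
      (s.foldl (fun grid i => if i == 10 then grid ++ [[]] else appendLastA grid i) (acc ++ [cur]))
        = acc ++ ((cur ++ (splitSpec s).headI) :: (splitSpec s).tail) := by
  induction s with
  | nil => intro acc cur; simp [splitSpec]
  | cons a t ih =>
      intro acc cur
      rw [List.foldl_cons]
      by_cases h : a = 10
      · rw [if_pos (by simp [h]), ih (acc ++ [cur]) []]
        simp [h, splitSpec, headI_cons_tail _ (splitSpec_ne_nil t)]
      · rw [if_neg (by simp [h]), appendLastA_append, ih acc (cur ++ [a])]
        simp [splitSpec, h, List.append_assoc]

theorem stringtogrid_eq_splitSpec (s : List Int) : stringtogrid s = splitSpec s := by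
  have := foldlA_eq s [] []
  simpa [stringtogrid, headI_cons_tail _ (splitSpec_ne_nil s)] using this

-- ---- B side ----

-- recursive form of the zip-of-breaks row extraction
def rowsR (s : List Int) : List Int → List (List Int)
  | b :: b' :: bs => PySem.List.slice s (some (b + 1)) (some b') :: rowsR s (b' :: bs)
  | _ => []

theorem zip_map_eq_rowsR (s : List Int) (bs : List Int) :
    (bs.zip bs.tail).map (fun p => PySem.List.slice s (some (p.1 + 1)) (some p.2)) = rowsR s bs := by
  induction bs with
  | nil => rfl
  | cons b rest ih =>
      cases rest with
      | nil => rfl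
      | cons b' bs' => simpa [rowsR] using ih

theorem slice_shift (a : Int) (t : List Int) (p q : Int) (hp : 0 ≤ p) (hq : 0 ≤ q) :
    PySem.List.slice (a :: t) (some (p + 1)) (some (q + 1)) = PySem.List.slice t (some p) (some q) := by
  rw [PySem.List.slice_toNat (a :: t) (by omega) (by omega), PySem.List.slice_toNat t hp hq]
  have h1 : (p + 1).toNat = p.toNat + 1 := by omega
  have h2 : (q + 1).toNat = q.toNat + 1 := by omega
  simp [h1, h2]

theorem slice_head (a : Int) (t : List Int) (q : Int) (hq : 0 ≤ q) :
    PySem.List.slice (a :: t) (some 0) (some (q + 1)) = a :: PySem.List.slice t (some 0) (some q) := by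
  rw [PySem.List.slice_toNat (a :: t) le_rfl (by omega), PySem.List.slice_toNat t le_rfl hq]
  have h2 : (q + 1).toNat = q.toNat + 1 := by omega
  simp [h2]

theorem rowsR_shift (a : Int) (t : List Int) :
    ∀ (bs : List Int) (b : Int), -1 ≤ b → (∀ x ∈ bs, 0 ≤ x) →
      rowsR (a :: t) ((b + 1) :: bs.map (· + 1)) = rowsR t (b :: bs) := by
  intro bs
  induction bs with
  | nil => intro b _ _; rfl
  | cons r rs ih =>
      intro b hb1 hb
      have hr : 0 ≤ r := hb r (List.mem_cons_self ..)
      simp only [List.map_cons, rowsR]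
      rw [slice_shift a t (b + 1) r (by omega) hr,
        ih r (by omega) (fun x hx => hb x (List.mem_cons_of_mem _ hx))]

-- positions: enumerate bookkeeping
theorem positions_shift (s : List Int) :
    ∀ j : Int, ((PySem.List.enumerate s (j + 1)).filter (fun p => p.2 == 10)).map (fun p => p.1)
      = (((PySem.List.enumerate s j).filter (fun p => p.2 == 10)).map (fun p => p.1)).map (· + 1) := by
  induction s with
  | nil => intro j; simp [PySem.List.enumerate_nil]
  | cons a t ih =>
      intro j
      by_cases h : a = 10 <;>
        simp [PySem.List.enumerate_cons, h, ih (j + 1), ih j]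

theorem positions_ge (s : List Int) :
    ∀ j : Int, ∀ x ∈ ((PySem.List.enumerate s j).filter (fun p => p.2 == 10)).map (fun p => p.1), j ≤ x := by
  induction s with
  | nil => intro j x hx; simp [PySem.List.enumerate_nil] at hx
  | cons a t ih =>
      intro j x hx
      by_cases h : a = 10 <;>
        simp only [PySem.List.enumerate_cons, List.filter_cons, h] at hx
      · simp at hx
        rcases hx with h' | h'
        · omega
        · have := ih (j + 1) x (by simpa using h'); omega
      · simp [h] at hx
        have := ih (j + 1) x (by simpa using hx); omega

theorem positionsB_cons (a : Int) (t : List Int) :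
    positionsB (a :: t) = (if a = 10 then [0] else []) ++ (positionsB t).map (· + 1) := by
  unfold positionsB
  have hs := positions_shift t 0
  norm_num at hs
  by_cases h : a = 10 <;>
    simp [PySem.List.enumerate_cons, h, hs]

theorem positionsB_nonneg (t : List Int) : ∀ x ∈ positionsB t, 0 ≤ x :=
  fun x hx => positions_ge t 0 x hx

theorem rowsR_breaks_eq (s : List Int) :
    rowsR s ((-1) :: (positionsB s ++ [(s.length : Int)])) = splitSpec s := by
  induction s with
  | nil =>
      show PySem.List.slice [] (some (-1 + 1)) (some 0) :: rowsR [] [(0 : Int)] = splitSpec []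
      rw [show ((-1 : Int) + 1) = 0 from rfl, PySem.List.slice_toNat ([] : List Int) le_rfl le_rfl]
      simp [rowsR, splitSpec]
  | cons a t ih =>
      have hrest : ∀ x ∈ positionsB t ++ [(t.length : Int)], 0 ≤ x := by
        intro x hx
        rcases List.mem_append.1 hx with h | h
        · exact positionsB_nonneg t x h
        · simp at h; omega
      have hmap : positionsB (a :: t) ++ [((a :: t).length : Int)]
          = (if a = 10 then [0] else []) ++ (positionsB t ++ [(t.length : Int)]).map (· + 1) := by
        rw [positionsB_cons]
        simp [List.length_cons]
      by_cases h : a = 10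
      · subst h
        rw [hmap]
        simp only [if_true, List.singleton_append]
        rw [rowsR,
          show ((0 : Int) :: (positionsB t ++ [(t.length : Int)]).map (· + 1))
            = ((-1 : Int) + 1) :: (positionsB t ++ [(t.length : Int)]).map (· + 1) from by norm_num,
          rowsR_shift 10 t _ (-1) le_rfl hrest, ih]
        have hempty : PySem.List.slice ((10 : Int) :: t) (some (-1 + 1)) (some 0) = [] := by
          rw [show (-1 : Int) + 1 = 0 from rfl, PySem.List.slice_toNat _ le_rfl le_rfl]
          simp
        rw [hempty, splitSpec]
        simp
      · rw [hmap]
        simp only [h, if_false, List.nil_append]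
        rcases hrs : positionsB t ++ [(t.length : Int)] with _ | ⟨r0, rs⟩
        · exact absurd hrs (by simp)
        have hr0 : 0 ≤ r0 := hrest r0 (by rw [hrs]; exact List.mem_cons_self ..)
        have hrs' : ∀ x ∈ rs, 0 ≤ x := fun x hx => hrest x (by rw [hrs]; exact List.mem_cons_of_mem _ hx)
        simp only [List.map_cons, rowsR]
        rw [show (-1 : Int) + 1 = 0 from rfl, slice_head a t r0 hr0,
          rowsR_shift a t rs r0 (by omega) hrs']
        have hih : PySem.List.slice t (some (-1 + 1)) (some r0) :: rowsR t (r0 :: rs) = splitSpec t := by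
          rw [← rowsR]; rw [hrs] at ih; exact ih
        have hhead : (splitSpec t).headI = PySem.List.slice t (some 0) (some r0) := by
          rw [← hih]; rfl
        have htail : (splitSpec t).tail = rowsR t (r0 :: rs) := by
          rw [← hih]; rfl
        rw [splitSpec]
        simp [h, hhead, htail]

theorem stringtogrid_alt_eq_splitSpec (s : List Int) : stringtogrid_alt s = splitSpec s := by
  simp only [stringtogrid_alt, List.singleton_append, zip_map_eq_rowsR]
  exact rowsR_breaks_eq s

-- ===== VERDICT (by name: the statement is the Claim_ definition above) =====
theorem stringtogrid_spec : Claim_equal_stringtogrid := by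
  intro s _ _
  show stringtogrid s = stringtogrid_alt s
  rw [stringtogrid_eq_splitSpec, stringtogrid_alt_eq_splitSpec]
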